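-- pv_equiv track=rewrite | github.com/MrBrantCode/unitest_baseline | mut_generate/mist_train_taco/taco_2338/solution.py | optimize_array
-- ===== SOURCE A (Python) =====
-- def optimize_array(n, m, A, B, C):
--     mod = 10 ** 9 + 7
--     tmp = [-1] * (n + 1)
--
--     for i in range(m):
--         if tmp[B[i]] == -1:
--             tmp[B[i]] = C[i]
--         else:
--             tmp[B[i]] *= C[i]
--             tmp[B[i]] %= mod
--
--     for i in range(1, n + 1):
--         if tmp[i] >= 0:
--             for j in range(1, n // i + 1):
--                 A[i * j - 1] *= tmp[i]
--                 A[i * j - 1] %= mod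
--
--     return A
-- ===== SOURCE B (Python) =====
-- def optimize_array(n, m, A, B, C):
--     # Same tmp-building pass as the original; the second phase gathers, per
--     # position p, the divisors of p by trial division up to sqrt(p) and applies
--     # a single modular multiplication by their accumulated product, instead of
--     # sieving over multiples with repeated in-place updates.
--     # Returns a fresh list (does not mutate A in place).
--     mod = 10 ** 9 + 7
--     tmp = [-1] * (n + 1)
--     for i in range(m):
--         if tmp[B[i]] == -1:
--             tmp[B[i]] = C[i]
--         else:
--             tmp[B[i]] *= C[i]
--             tmp[B[i]] %= mod
--     out = []
--     for p, a in enumerate(A, 1):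
--         if p <= n:
--             prod = None
--             d = 1
--             while d * d <= p:
--                 if p % d == 0:
--                     qs = (d, p // d) if d * d < p else (d,)
--                     for q in qs:
--                         if tmp[q] >= 0:
--                             prod = tmp[q] if prod is None else prod * tmp[q] % mod
--                 d += 1
--             if prod is not None:
--                 a = a * prod % mod
--         out.append(a)
--     return out
-- ===== Notes on version B (the rewrite author's own statement) =====
-- stated objective: alternative
-- what changed: The second phase is inverted: instead of sieving over the multiples of every index with a positive tmp entry and updating A in place step by step, B walks each position once, enumerates the divisors of that position by trial division up to its square root, and applies a single modular multiplication by the accumulated product of the qualifying tmp entries (returning a fresh list instead of mutating A).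
-- outside the precondition, e.g. on optimize_array(2, 1, [7], [1], [-5]): A returns [7], B returns [7]
import Mathlib
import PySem

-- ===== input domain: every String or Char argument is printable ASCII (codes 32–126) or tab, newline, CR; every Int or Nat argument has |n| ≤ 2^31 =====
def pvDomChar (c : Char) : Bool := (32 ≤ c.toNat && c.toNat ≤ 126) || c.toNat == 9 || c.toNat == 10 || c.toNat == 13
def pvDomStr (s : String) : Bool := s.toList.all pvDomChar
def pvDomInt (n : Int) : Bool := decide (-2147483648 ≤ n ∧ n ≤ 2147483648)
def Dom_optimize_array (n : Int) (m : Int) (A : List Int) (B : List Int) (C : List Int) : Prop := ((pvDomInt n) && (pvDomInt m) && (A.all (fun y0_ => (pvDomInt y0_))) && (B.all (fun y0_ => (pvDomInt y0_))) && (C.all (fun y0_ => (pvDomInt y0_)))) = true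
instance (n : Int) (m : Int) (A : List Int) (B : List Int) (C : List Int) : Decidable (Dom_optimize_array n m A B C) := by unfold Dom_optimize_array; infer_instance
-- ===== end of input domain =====

-- B replaces A's in-place sieve over multiples by a per-position gather of the divisors
-- of each position (trial division up to sqrt) and one modular multiplication by their
-- product; B also returns a fresh list (A mutates its argument A in place — the
-- equivalence proved here is about the return value only).

-- mod = 10 ** 9 + 7 (shared by both ports)
def pvMod : Int := 10 ^ 9 + 7

-- Python-list indexing on a Lean Array (a Python list is an array; O(1) indexing):
-- normalised index (negative = from the end), none = IndexError
def pvAIdx (sz : Nat) (i : Int) : Option Nat :=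
  if 0 ≤ i ∧ i < (sz : Int) then some i.toNat
  else if -(sz : Int) ≤ i ∧ i < 0 then some (i + sz).toNat else none

def pvAGet? (xs : Array Int) (i : Int) : Option Int :=
  (pvAIdx xs.size i).map (fun j => xs.getD j (-1))

def pvASet (xs : Array Int) (i : Int) (v : Int) : Array Int :=
  match pvAIdx xs.size i with
  | some j => xs.setIfInBounds j v
  | none => xs

-- first loop of both Pythons (their texts are identical): build tmp with the -1 sentinel;
-- 'tmp[B[i]] *= C[i]; tmp[B[i]] %= mod' is ported as one write of (tv * C[i]) % mod
def pvBuildTmp (n : Int) (m : Int) (B : List Int) (C : List Int) : Array Int :=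
  (PySem.List.pyRange 0 m 1).foldl (fun tmp i =>
    match PySem.List.pyGet? B i, PySem.List.pyGet? C i with
    | some b, some c =>
      match pvAGet? tmp b with
      | some tv => if tv = -1 then pvASet tmp b c
                   else pvASet tmp b (tv * c % pvMod)
      | none => tmp
    | _, _ => tmp) (Array.replicate (n + 1).toNat (-1))

-- ===== PORT A =====
-- body of A's inner loop: A[i*j-1] *= tmp[i]; A[i*j-1] %= mod (one write of (a*t) % mod)
def pvInnerStep (i : Int) (t : Int) (acc : List Int) (j : Int) : List Int :=
  match PySem.List.pyGet? acc (i * j - 1) with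
  | some a => PySem.List.pySetD acc (i * j - 1) (a * t % pvMod)
  | none => acc

-- body of A's outer loop: if tmp[i] >= 0: for j in range(1, n // i + 1): …
def pvOuterStep (tmp : Array Int) (n : Int) (acc : List Int) (i : Int) : List Int :=
  match pvAGet? tmp i with
  | some tv =>
    if tv ≥ 0 then
      (PySem.List.pyRange 1 (PySem.Int.floordiv n i + 1) 1).foldl (pvInnerStep i tv) acc
    else acc
  | none => acc

def optimize_array (n : Int) (m : Int) (A : List Int) (B : List Int) (C : List Int) : List Int :=
  let tmp := pvBuildTmp n m B C
  (PySem.List.pyRange 1 (n + 1) 1).foldl (pvOuterStep tmp n) A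

-- ===== PORT B =====
-- qs = (d, p // d) if d * d < p else (d,)
def pvPairs (p : Int) (d : Int) : List Int :=
  if d * d < p then [d, PySem.Int.floordiv p d] else [d]

-- body of B's 'for q in qs' loop: if tmp[q] >= 0: prod = tmp[q] if prod is None else prod * tmp[q] % mod
def pvQStep (tmp : Array Int) (prod : Option Int) (q : Int) : Option Int :=
  match pvAGet? tmp q with
  | some t => if t ≥ 0 then some (match prod with | none => t | some x => x * t % pvMod) else prod
  | none => prod

-- B's 'while d * d <= p' loop; fuel is an upper bound on the iteration count
def pvDivLoop (tmp : Array Int) (p : Int) : Nat → Int → Option Int → Option Int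
  | 0, _, prod => prod
  | fuel + 1, d, prod =>
    if d * d ≤ p then
      pvDivLoop tmp p fuel (d + 1)
        (if p % d = 0 then (pvPairs p d).foldl (pvQStep tmp) prod else prod)
    else prod

def optimize_array_alt (n : Int) (m : Int) (A : List Int) (B : List Int) (C : List Int) : List Int :=
  let tmp := pvBuildTmp n m B C
  (PySem.List.enumerate A 1).foldl (fun out pa =>
    out ++ [if pa.1 ≤ n then
        match pvDivLoop tmp pa.1 (pa.1.toNat + 1) 1 none with
        | none => pa.2
        | some q => pa.2 * q % pvMod
      else pa.2]) []

-- ===== PRECONDITION & SPEC =====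
-- Pre_ excludes the inputs where the Python A raises (with m > 0: m > len(B) or
-- m > len(C); some B[i] outside [-(n+1), n], an IndexError on tmp; a sieved position
-- beyond len(A)).  With m > 0 the bounds 0 ≤ n ≤ len(A) also exclude some inputs A
-- happens to return on because no update ever reaches the missing part of A (e.g. every
-- tmp entry stays negative); on those A and B agree anyway — see the cites.
def Pre_optimize_array (n : Int) (m : Int) (A : List Int) (B : List Int) (C : List Int) : Prop :=
  0 < m → (m ≤ (B.length : Int) ∧ m ≤ (C.length : Int) ∧ 0 ≤ n ∧ n ≤ (A.length : Int) ∧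
    ∀ x ∈ B.take m.toNat, -(n + 1) ≤ x ∧ x ≤ n)
instance (n : Int) (m : Int) (A : List Int) (B : List Int) (C : List Int) : Decidable (Pre_optimize_array n m A B C) := by unfold Pre_optimize_array; infer_instance

def pvWitness_optimize_array : Int × Int × List Int × List Int × List Int :=
  (3, 2, [1, 2, 3], [1, 2], [5, 7])

def Spec_optimize_array (n : Int) (m : Int) (A : List Int) (B : List Int) (C : List Int) (out : List Int) : Prop := out = optimize_array_alt n m A B C
instance (n : Int) (m : Int) (A : List Int) (B : List Int) (C : List Int) (out : List Int) : Decidable (Spec_optimize_array n m A B C out) := by unfold Spec_optimize_array; infer_instance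

-- ===== CLAIM (what is proved, stated in full; the proofs are below) =====
def Claim_equal_optimize_array : Prop := ∀ (n : Int) (m : Int) (A : List Int) (B : List Int) (C : List Int), Dom_optimize_array n m A B C → Pre_optimize_array n m A B C → Spec_optimize_array n m A B C (optimize_array n m A B C)

-- ===== LEMMAS AND PROOFS =====

-- tmp[q] read with -1 for an out-of-range index (both ports skip exactly when pvG < 0)
def pvG (tmp : Array Int) (q : Int) : Int := (pvAGet? tmp q).getD (-1)

-- one multiplicative update, as both Pythons perform it
def pvStep (x t : Int) : Int := x * t % pvMod

def pvMF (a : Int) (L : List Int) : Int := L.foldl pvStep a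

def pvOStep (prod : Option Int) (t : Int) : Option Int :=
  some (match prod with | none => t | some x => x * t % pvMod)

-- the qualifying multiplier values at position p (divisors i of p in [1, n] with tmp[i] ≥ 0)
def pvQ (tmp : Array Int) (n p : Int) : List Int :=
  ((PySem.List.pyRange 1 (n + 1) 1).filter
    (fun i => decide (0 ≤ pvG tmp i) && decide (i ∣ p))).map (pvG tmp)

def pvS (p : Int) : Int := (Nat.sqrt p.toNat : Int)

lemma pv_emod_mul (x t : Int) : (x % pvMod) * t % pvMod = x * t % pvMod := by
  conv_lhs => rw [Int.mul_emod]
  rw [Int.emod_emod_of_dvd x dvd_rfl, ← Int.mul_emod]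

lemma pv_mul_emod (a b : Int) : a * (b % pvMod) % pvMod = a * b % pvMod := by
  conv_lhs => rw [Int.mul_emod]
  rw [Int.emod_emod_of_dvd b dvd_rfl, ← Int.mul_emod]

lemma pvMF_red : ∀ (L : List Int) (x : Int), pvMF (x % pvMod) L = x * L.prod % pvMod := by
  intro L
  induction L with
  | nil => intro x; simp [pvMF]
  | cons t L ih =>
    intro x
    have h1 : pvMF (x % pvMod) (t :: L) = pvMF ((x % pvMod) * t % pvMod) L := rfl
    rw [h1]
    rw [pv_emod_mul, ih (x * t)]
    simp [List.prod_cons, mul_assoc]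

lemma pvMF_prod (L : List Int) (a : Int) (h : L ≠ []) : pvMF a L = a * L.prod % pvMod := by
  cases L with
  | nil => exact absurd rfl h
  | cons t L =>
    have h1 : pvMF a (t :: L) = pvMF (a * t % pvMod) L := rfl
    rw [h1, pvMF_red, List.prod_cons, mul_assoc]

-- ===== scatter characterisation of A's second phase =====

lemma pv_inner_len : ∀ (js : List Int) (i t : Int) (S : List Int),
    (js.foldl (pvInnerStep i t) S).length = S.length := by
  intro js
  induction js with
  | nil => intro i t S; rfl
  | cons j js ih =>
    intro i t S
    rw [List.foldl_cons, ih]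
    unfold pvInnerStep
    cases hg : PySem.List.pyGet? S (i * j - 1) with
    | none => rfl
    | some a => simp [PySem.List.length_pySetD]

lemma pv_inner_get (i t : Int) (hi : 1 ≤ i) :
    ∀ (u : Nat) (S : List Int), i * (u : Int) ≤ (S.length : Int) →
    ∀ k : Nat,
    ((PySem.List.pyRange 1 ((u : Int) + 1) 1).foldl (pvInnerStep i t) S)[k]? =
      if i ∣ ((k : Int) + 1) ∧ (k : Int) + 1 ≤ i * (u : Int) then (S[k]?).map (fun a => pvStep a t)
      else S[k]? := by
  intro u
  induction u with
  | zero =>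
    intro S hlen k
    rw [show ((0 : Nat) : Int) + 1 = 1 by norm_num, PySem.List.pyRange_one_eq_nil le_rfl, List.foldl_nil]
    rw [if_neg (by rintro ⟨hdvd, hle⟩; omega)]
  | succ u ih =>
    intro S hlen k
    simp only [Nat.cast_add, Nat.cast_one] at hlen ⊢
    have hu1 : i * (u : Int) ≤ (S.length : Int) := by nlinarith
    have hlen' : ((PySem.List.pyRange 1 ((u : Int) + 1) 1).foldl (pvInnerStep i t) S).length = S.length :=
      pv_inner_len _ i t S
    rw [PySem.List.pyRange_one_succ_right (by omega), List.foldl_append, List.foldl_cons, List.foldl_nil]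
    set prev := (PySem.List.pyRange 1 ((u : Int) + 1) 1).foldl (pvInnerStep i t) S with hprev
    have hidx : (0 : Int) ≤ i * ((u : Int) + 1) - 1 := by nlinarith
    have hidx2 : i * ((u : Int) + 1) - 1 < (prev.length : Int) := by
      rw [hlen']; omega
    unfold pvInnerStep
    cases hg : PySem.List.pyGet? prev (i * ((u : Int) + 1) - 1) with
    | none =>
      rw [PySem.List.pyGet?_eq_some_getElem prev hidx hidx2] at hg
      exact absurd hg (by simp)
    | some a =>
      rw [show (match some a with
          | some a => PySem.List.pySetD prev (i * ((u : Int) + 1) - 1) (a * t % pvMod)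
          | none => prev)
        = PySem.List.pySetD prev (i * ((u : Int) + 1) - 1) (a * t % pvMod) from rfl]
      rw [PySem.List.pySetD_of_nonneg prev _ hidx]
      set e : Nat := (i * ((u : Int) + 1) - 1).toNat with he
      have hei : (e : Int) = i * ((u : Int) + 1) - 1 := Int.toNat_of_nonneg hidx
      have hpe : prev[e]? = some a := by
        rw [he, ← PySem.List.pyGet?_of_nonneg prev hidx, hg]
      by_cases hk : k = e
      · have hkd : i ∣ (k : Int) + 1 := ⟨(u : Int) + 1, by omega⟩
        have hpk : prev[k]? = S[k]? := by
          rw [ih S hu1 k, if_neg (by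
            rintro ⟨⟨j, hj⟩, hle⟩
            have hju : j ≤ (u : Int) := le_of_mul_le_mul_left (by omega) (by omega : (0:Int) < i)
            have hju2 : i * ((u:Int)+1) ≤ i * j := by omega
            have := le_of_mul_le_mul_left hju2 (by omega : (0:Int) < i)
            omega)]
        have hSk : S[k]? = some a := by rw [← hpk, hk]; exact hpe
        rw [List.getElem?_set, if_pos (by omega : e = k), if_pos (by omega : e < prev.length)]
        rw [if_pos ⟨hkd, by omega⟩, hSk]
        rfl
      · rw [List.getElem?_set, if_neg (by omega : ¬ e = k)]
        rw [ih S hu1 k]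
        by_cases hc : i ∣ (k : Int) + 1 ∧ (k : Int) + 1 ≤ i * ((u : Int) + 1)
        · obtain ⟨⟨j, hj⟩, hle⟩ := hc
          have hj1 : 1 ≤ j := by nlinarith
          have hjle : j ≤ (u : Int) + 1 := le_of_mul_le_mul_left (by omega) (by omega : (0:Int) < i)
          have hjne : j ≠ (u : Int) + 1 := by
            intro hh
            apply hk
            have hke : (k : Int) = i * ((u : Int) + 1) - 1 := by rw [← hh]; omega
            omega
          have hij : i * j ≤ i * (u : Int) := mul_le_mul_of_nonneg_left (by omega) (by omega)
          rw [if_pos ⟨⟨j, hj⟩, by omega⟩, if_pos ⟨⟨j, hj⟩, hle⟩]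
        · rw [if_neg hc, if_neg (by
            rintro ⟨hdvd, hle⟩
            exact hc ⟨hdvd, by nlinarith⟩)]

lemma pv_outer_len : ∀ (is : List Int) (tmp : Array Int) (n : Int) (S : List Int),
    (is.foldl (pvOuterStep tmp n) S).length = S.length := by
  intro is
  induction is with
  | nil => intro tmp n S; rfl
  | cons i is ih =>
    intro tmp n S
    rw [List.foldl_cons, ih]
    unfold pvOuterStep
    cases hg : pvAGet? tmp i with
    | none => rfl
    | some tv =>
      by_cases htv : tv ≥ 0
      · simp [htv, pv_inner_len]
      · simp [htv]

lemma pvMF_append_singleton (a t : Int) (L : List Int) :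
    pvMF a (L ++ [t]) = pvStep (pvMF a L) t := by
  simp [pvMF, List.foldl_append]

lemma pvOuterStep_char (tmp : Array Int) (n : Int) (acc : List Int) (i : Int) :
    pvOuterStep tmp n acc i =
      if 0 ≤ pvG tmp i then
        (PySem.List.pyRange 1 (PySem.Int.floordiv n i + 1) 1).foldl (pvInnerStep i (pvG tmp i)) acc
      else acc := by
  unfold pvOuterStep pvG
  cases hg : pvAGet? tmp i with
  | none => simp
  | some tv => simp [ge_iff_le]

lemma pv_outer_get (tmp : Array Int) (n : Int) (hn0 : 0 ≤ n) :
    ∀ (v : Nat), (v : Int) ≤ n →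
    ∀ (S : List Int), n ≤ (S.length : Int) →
    ∀ k : Nat,
    ((PySem.List.pyRange 1 ((v : Int) + 1) 1).foldl (pvOuterStep tmp n) S)[k]? =
      (S[k]?).map (fun a => pvMF a
        (((PySem.List.pyRange 1 ((v : Int) + 1) 1).filter
            (fun i => decide (0 ≤ pvG tmp i) && decide (i ∣ ((k : Int) + 1)) &&
              decide ((k : Int) + 1 ≤ n))).map (pvG tmp))) := by
  intro v
  induction v with
  | zero =>
    intro hv S hlen k
    rw [show ((0 : Nat) : Int) + 1 = 1 by norm_num, PySem.List.pyRange_one_eq_nil le_rfl,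
        List.foldl_nil, List.filter_nil, List.map_nil]
    cases S[k]? <;> rfl
  | succ v ih =>
    intro hv S hlen k
    simp only [Nat.cast_add, Nat.cast_one] at hv ⊢
    rw [PySem.List.pyRange_one_succ_right (by omega : (1:Int) ≤ (v:Int)+1), List.foldl_append,
        List.foldl_cons, List.foldl_nil, List.filter_append, List.map_append]
    set prev := (PySem.List.pyRange 1 ((v : Int) + 1) 1).foldl (pvOuterStep tmp n) S with hprev
    have hprevlen : prev.length = S.length := pv_outer_len _ tmp n S
    have hih := ih (by omega) S hlen k
    simp only [List.filter_cons, List.filter_nil]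
    rw [pvOuterStep_char]
    by_cases hok : 0 ≤ pvG tmp ((v : Int) + 1)
    · rw [if_pos hok, PySem.Int.floordiv_eq_ediv_of_pos (by omega : (0:Int) < (v:Int)+1)]
      have hu0 : 0 ≤ n / ((v:Int)+1) := Int.ediv_nonneg hn0 (by omega)
      have hui : ((n / ((v:Int)+1)).toNat : Int) = n / ((v:Int)+1) := Int.toNat_of_nonneg hu0
      rw [show n / ((v:Int)+1) + 1 = ((n / ((v:Int)+1)).toNat : Int) + 1 by omega]
      have hmul : n / ((v:Int)+1) * ((v:Int)+1) ≤ n := Int.ediv_mul_le n (by omega)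
      have hiu : ((v:Int)+1) * ((n / ((v:Int)+1)).toNat : Int) ≤ (prev.length : Int) := by
        rw [hui, hprevlen, mul_comm]
        linarith
      rw [pv_inner_get ((v:Int)+1) (pvG tmp ((v:Int)+1)) (by omega) (n / ((v:Int)+1)).toNat prev hiu k]
      by_cases hdvd : ((v:Int)+1) ∣ (k:Int) + 1
      · by_cases hkn : (k:Int) + 1 ≤ n
        · have hle : (k:Int) + 1 ≤ ((v:Int)+1) * ((n / ((v:Int)+1)).toNat : Int) := by
            obtain ⟨j, hj⟩ := hdvd
            have hj' : ((v:Int)+1) * j ≤ n := by omega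
            have hjd : (((v:Int)+1) * j) / ((v:Int)+1) = j := Int.mul_ediv_cancel_left j (by omega)
            have hj2 := Int.ediv_le_ediv (by omega : (0:Int) < (v:Int)+1) hj'
            rw [hjd] at hj2
            rw [hui]
            calc (k:Int) + 1 = ((v:Int)+1) * j := hj
              _ ≤ ((v:Int)+1) * (n / ((v:Int)+1)) := mul_le_mul_of_nonneg_left hj2 (by omega)
          rw [if_pos ⟨hdvd, hle⟩, if_pos (by simp [hok, hdvd, hkn])]
          simp only [List.map_cons, List.map_nil]
          rw [hih]
          cases hSk : S[k]? with
          | none => rfl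
          | some a =>
            simp only [Option.map_some]
            rw [pvMF_append_singleton]
        · have hnle : ¬ ((k:Int) + 1 ≤ ((v:Int)+1) * ((n / ((v:Int)+1)).toNat : Int)) := by
            rw [hui, mul_comm]
            intro hcon
            exact hkn (by linarith)
          rw [if_neg (by rintro ⟨_, hle2⟩; exact hnle hle2), if_neg (by simp [hkn])]
          simp only [List.map_nil, List.append_nil]
          exact hih
      · rw [if_neg (by rintro ⟨hd2, _⟩; exact hdvd hd2), if_neg (by simp [hdvd])]
        simp only [List.map_nil, List.append_nil]
        exact hih
    · rw [if_neg hok, if_neg (by simp [hok])]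
      simp only [List.map_nil, List.append_nil]
      exact hih

-- ===== gather characterisation of B's per-position loop =====

lemma pv_sqrt_iff (d p : Int) (hd : 1 ≤ d) : d * d ≤ p ↔ d ≤ pvS p := by
  unfold pvS
  rcases le_or_gt 0 p with hp | hp
  · have hdn : ((d.toNat : Int)) = d := Int.toNat_of_nonneg (by omega)
    have hpn : ((p.toNat : Int)) = p := Int.toNat_of_nonneg hp
    constructor
    · intro h
      have h' : d.toNat * d.toNat ≤ p.toNat := by
        have : ((d.toNat * d.toNat : Nat) : Int) ≤ ((p.toNat : Nat) : Int) := by push_cast; rw [hdn, hpn]; exact h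
        exact_mod_cast this
      have := Nat.le_sqrt.mpr h'
      calc d = ((d.toNat : Nat) : Int) := hdn.symm
        _ ≤ (Nat.sqrt p.toNat : Int) := by exact_mod_cast this
    · intro h
      have h' : d.toNat ≤ Nat.sqrt p.toNat := by
        have : ((d.toNat : Nat) : Int) ≤ (Nat.sqrt p.toNat : Int) := by rw [hdn]; exact h
        exact_mod_cast this
      have h2 := Nat.le_sqrt.mp h'
      calc d * d = ((d.toNat * d.toNat : Nat) : Int) := by push_cast; rw [hdn]
        _ ≤ ((p.toNat : Nat) : Int) := by exact_mod_cast h2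
        _ = p := hpn
  · constructor
    · intro h; nlinarith
    · intro h
      have h0 : p.toNat = 0 := by omega
      rw [h0] at h
      norm_num [Nat.sqrt] at h
      omega

lemma pv_divloop_eq (tmp : Array Int) (p : Int) :
    ∀ (fuel : Nat) (d : Int) (prod : Option Int), 1 ≤ d → pvS p + 1 ≤ d + (fuel : Int) →
    pvDivLoop tmp p fuel d prod =
      ((PySem.List.pyRange d (pvS p + 1) 1).filter (fun e => decide (p % e = 0))).foldl
        (fun prod e => (pvPairs p e).foldl (pvQStep tmp) prod) prod := by
  intro fuel
  induction fuel with
  | zero =>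
    intro d prod hd hfuel
    rw [PySem.List.pyRange_one_eq_nil (by push_cast at hfuel; omega)]
    rfl
  | succ fuel ih =>
    intro d prod hd hfuel
    simp only [pvDivLoop]
    by_cases hdd : d * d ≤ p
    · have hds : d ≤ pvS p := (pv_sqrt_iff d p hd).mp hdd
      rw [if_pos hdd, PySem.List.pyRange_one_cons (by omega : d < pvS p + 1)]
      by_cases hpd : p % d = 0
      · rw [List.filter_cons_of_pos (by simpa using hpd), List.foldl_cons, if_pos hpd]
        exact ih (d + 1) _ (by omega) (by push_cast at hfuel ⊢; omega)
      · rw [List.filter_cons_of_neg (by simpa using hpd), if_neg hpd]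
        exact ih (d + 1) _ (by omega) (by push_cast at hfuel ⊢; omega)
    · have hds : ¬ d ≤ pvS p := fun h => hdd ((pv_sqrt_iff d p hd).mpr h)
      rw [if_neg hdd, PySem.List.pyRange_one_eq_nil (by omega)]
      rfl

lemma pv_foldl_flatMap (tmp : Array Int) (p : Int) :
    ∀ (L : List Int) (init : Option Int),
    L.foldl (fun prod e => (pvPairs p e).foldl (pvQStep tmp) prod) init =
      (L.flatMap (pvPairs p)).foldl (pvQStep tmp) init := by
  intro L
  induction L with
  | nil => intro init; rfl
  | cons e L ih =>
    intro init
    rw [List.foldl_cons, ih, List.flatMap_cons, List.foldl_append]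

lemma pv_qstep_filter (tmp : Array Int) :
    ∀ (L : List Int) (prod : Option Int),
    L.foldl (pvQStep tmp) prod =
      ((L.filter (fun q => decide (0 ≤ pvG tmp q))).map (pvG tmp)).foldl pvOStep prod := by
  intro L
  induction L with
  | nil => intro prod; rfl
  | cons q L ih =>
    intro prod
    rw [List.foldl_cons, ih]
    by_cases hq : 0 ≤ pvG tmp q
    · have heq : pvQStep tmp prod q = pvOStep prod (pvG tmp q) := by
        unfold pvQStep pvOStep
        unfold pvG at hq ⊢
        cases hg : pvAGet? tmp q with
        | none => rw [hg] at hq; norm_num at hq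
        | some t =>
          rw [hg] at hq
          simp only [Option.getD_some] at hq
          simp only [Option.getD_some]
          show (if t ≥ 0 then some (match prod with | none => t | some x => x * t % pvMod) else prod)
            = some (match prod with | none => t | some x => x * t % pvMod)
          rw [if_pos (by omega : t ≥ 0)]
      rw [List.filter_cons_of_pos (by simpa using hq), List.map_cons, List.foldl_cons, heq]
    · have heq : pvQStep tmp prod q = prod := by
        unfold pvQStep
        unfold pvG at hq
        cases hg : pvAGet? tmp q with
        | none => rfl
        | some t =>
          rw [hg] at hq
          simp only [Option.getD_some] at hq
          show (if t ≥ 0 then some (match prod with | none => t | some x => x * t % pvMod) else prod) = prod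
          rw [if_neg (by omega : ¬ t ≥ 0)]
      rw [List.filter_cons_of_neg (by simpa using hq), heq]

lemma pv_ostep_some : ∀ (L : List Int) (x : Int), L.foldl pvOStep (some x) = some (pvMF x L) := by
  intro L
  induction L with
  | nil => intro x; rfl
  | cons t L ih =>
    intro x
    rw [List.foldl_cons, pvMF, List.foldl_cons]
    exact ih (x * t % pvMod)

lemma pv_ostep_finish (L : List Int) (a : Int) :
    (match L.foldl pvOStep none with | none => a | some q => a * q % pvMod) = pvMF a L := by
  cases L with
  | nil => rfl
  | cons t L =>
    rw [List.foldl_cons]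
    have h0 : pvOStep none t = some t := rfl
    rw [h0, pv_ostep_some]
    cases hL : L == [] with
    | true =>
      have : L = [] := by simpa using hL
      subst this; rfl
    | false =>
      have hLne : L ≠ [] := by simpa using hL
      have h1 : pvMF t L = t * L.prod % pvMod := by
        have := pvMF_prod L t hLne; exact this
      have h2 : pvMF a (t :: L) = a * (t :: L).prod % pvMod := pvMF_prod _ _ (by simp)
      rw [h1, h2]
      simp only [List.prod_cons]
      rw [pv_mul_emod]

-- ===== the divisor permutation =====

lemma pv_flatMap_perm (p : Int) : ∀ (L : List Int),
    (L.flatMap (pvPairs p)).Perm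
      (L ++ (L.filter (fun d => decide (d * d < p))).map (fun d => PySem.Int.floordiv p d)) := by
  intro L
  induction L with
  | nil => simp
  | cons d L ih =>
    simp only [List.flatMap_cons, pvPairs, List.filter_cons, List.cons_append]
    by_cases h : d * d < p
    · rw [if_pos h, if_pos (show (decide (d * d < p)) = true by simpa using h)]
      simp only [List.map_cons, List.cons_append]
      exact List.Perm.cons d ((List.Perm.cons _ ih).trans List.perm_middle.symm)
    · rw [if_neg h, if_neg (show ¬ (decide (d * d < p)) = true by simpa using h)]
      simp only [List.singleton_append]
      exact List.Perm.cons d ih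

lemma pv_divisors_perm (p : Int) (hp : 1 ≤ p) :
    (((PySem.List.pyRange 1 (pvS p + 1) 1).filter (fun d => decide (d ∣ p))).flatMap (pvPairs p)).Perm
      ((PySem.List.pyRange 1 (p + 1) 1).filter (fun i => decide (i ∣ p))) := by
  have hp0 : 0 < p.toNat := by omega
  have hs1 : 1 ≤ pvS p := by
    unfold pvS; exact_mod_cast Nat.sqrt_pos.mpr hp0
  have hsp : pvS p ≤ p := by
    unfold pvS
    calc (Nat.sqrt p.toNat : Int) ≤ (p.toNat : Int) := by exact_mod_cast Nat.sqrt_le_self p.toNat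
      _ = p := Int.toNat_of_nonneg (by omega)
  have hss : pvS p * pvS p ≤ p := by
    unfold pvS
    have h := Nat.sqrt_le' p.toNat
    have : ((Nat.sqrt p.toNat * Nat.sqrt p.toNat : Nat) : Int) ≤ ((p.toNat : Nat) : Int) := by
      exact_mod_cast (by rw [← pow_two]; exact h : Nat.sqrt p.toNat * Nat.sqrt p.toNat ≤ p.toNat)
    push_cast at this
    rw [Int.toNat_of_nonneg (by omega : (0:Int) ≤ p)] at this
    exact this
  have hlt : p < (pvS p + 1) * (pvS p + 1) := by
    unfold pvS
    have h := Nat.lt_succ_sqrt' p.toNat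
    have : ((p.toNat : Nat) : Int) < ((Nat.sqrt p.toNat).succ * (Nat.sqrt p.toNat).succ : Nat) := by
      exact_mod_cast (by rw [← pow_two]; exact h : p.toNat < (Nat.sqrt p.toNat).succ * (Nat.sqrt p.toNat).succ)
    push_cast at this
    rw [Int.toNat_of_nonneg (by omega : (0:Int) ≤ p)] at this
    exact this
  refine (pv_flatMap_perm p _).trans ?_
  rw [PySem.List.pyRange_one_append 1 (pvS p + 1) (p + 1) (by omega) (by omega), List.filter_append]
  apply List.Perm.append_left
  have hnod1 : (((PySem.List.pyRange 1 (pvS p + 1) 1).filter (fun d => decide (d ∣ p))).filter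
      (fun d => decide (d * d < p))).Nodup :=
    ((PySem.List.nodup_pyRange_one 1 (pvS p + 1)).filter _).filter _
  have hmem1 : ∀ d ∈ ((PySem.List.pyRange 1 (pvS p + 1) 1).filter (fun d => decide (d ∣ p))).filter
      (fun d => decide (d * d < p)), 1 ≤ d ∧ d ≤ pvS p ∧ d ∣ p ∧ d * d < p := by
    intro d hd
    obtain ⟨hd', hdlt⟩ := List.mem_filter.mp hd
    obtain ⟨hdr, hdvd⟩ := List.mem_filter.mp hd'
    obtain ⟨h1, h2⟩ := PySem.List.mem_pyRange_one.mp hdr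
    exact ⟨h1, by omega, of_decide_eq_true hdvd, of_decide_eq_true hdlt⟩
  apply (List.perm_ext_iff_of_nodup ?_ ?_).2
  · intro a
    constructor
    · intro ha
      obtain ⟨d, hd, rfl⟩ := List.mem_map.mp ha
      obtain ⟨hd1, hds, hdvd, hddlt⟩ := hmem1 d hd
      have hda : p / d * d = p := Int.ediv_mul_cancel hdvd
      rw [PySem.Int.floordiv_eq_ediv_of_pos (by omega)]
      set a := p / d with ha_def
      have ha1 : 1 ≤ a := by nlinarith
      have hap : a ≤ p := by nlinarith
      have hsa : pvS p + 1 ≤ a := by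
        by_contra hcon
        have haS : a ≤ pvS p := by omega
        have hda2 : d < a := by nlinarith
        nlinarith
      refine List.mem_filter.mpr ⟨PySem.List.mem_pyRange_one.mpr ⟨hsa, by omega⟩, ?_⟩
      exact decide_eq_true ⟨d, hda.symm⟩
    · intro ha
      obtain ⟨har, hadvd⟩ := List.mem_filter.mp ha
      obtain ⟨ha1, ha2⟩ := PySem.List.mem_pyRange_one.mp har
      have hadvd : a ∣ p := of_decide_eq_true hadvd
      have h0a : 0 < a := by omega
      have hda : p / a * a = p := Int.ediv_mul_cancel hadvd
      set d := p / a with hd_def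
      have hd1 : 1 ≤ d := by nlinarith
      have hda2 : d < a := by nlinarith
      have hddlt : d * d < p := by nlinarith
      have hds : d ≤ pvS p := (pv_sqrt_iff d p hd1).mp (le_of_lt hddlt)
      refine List.mem_map.mpr ⟨d, ?_, ?_⟩
      · refine List.mem_filter.mpr ⟨List.mem_filter.mpr ⟨PySem.List.mem_pyRange_one.mpr ⟨hd1, by omega⟩, ?_⟩, ?_⟩
        · exact decide_eq_true ⟨a, by rw [← hda]⟩
        · exact decide_eq_true hddlt
      · rw [PySem.Int.floordiv_eq_ediv_of_pos (by omega : (0:Int) < d)]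
        rw [show p = d * a by rw [← hda]]
        exact Int.mul_ediv_cancel_left a (by omega)
  · apply hnod1.map_on
    intro x hx y hy hxy
    obtain ⟨hx1, hxs, hxdvd, hxlt⟩ := hmem1 x hx
    obtain ⟨hy1, hys, hydvd, hylt⟩ := hmem1 y hy
    rw [PySem.Int.floordiv_eq_ediv_of_pos (by omega : (0:Int) < x),
        PySem.Int.floordiv_eq_ediv_of_pos (by omega : (0:Int) < y)] at hxy
    have hxe : p / x * x = p := Int.ediv_mul_cancel hxdvd
    have hye : p / y * y = p := Int.ediv_mul_cancel hydvd
    have hq0 : p / x ≠ 0 := by intro h; rw [h] at hxe; omega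
    rw [hxy] at hxe
    have : p / y * x = p / y * y := by rw [hxe, hye]
    have := mul_left_cancel₀ (by rw [← hxy]; exact hq0) this
    exact this
  · exact (PySem.List.nodup_pyRange_one (pvS p + 1) (p + 1)).filter _

-- ===== per-position equality =====

lemma pvMF_perm {L1 L2 : List Int} (h : L1.Perm L2) (a : Int) : pvMF a L1 = pvMF a L2 := by
  by_cases h1 : L1 = []
  · subst h1
    rw [List.Perm.eq_nil h.symm]
  · have h2 : L2 ≠ [] := by
      intro hh; subst hh; exact h1 (List.Perm.eq_nil h)
    rw [pvMF_prod _ _ h1, pvMF_prod _ _ h2, h.prod_eq]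

lemma pv_elem_eq (tmp : Array Int) (n p a : Int) (hp : 1 ≤ p) (hpn : p ≤ n) :
    (match pvDivLoop tmp p (p.toNat + 1) 1 none with
     | none => a
     | some q => a * q % pvMod) = pvMF a (pvQ tmp n p) := by
  have hsp : pvS p ≤ p := by
    unfold pvS
    calc (Nat.sqrt p.toNat : Int) ≤ (p.toNat : Int) := by exact_mod_cast Nat.sqrt_le_self p.toNat
      _ = p := Int.toNat_of_nonneg (by omega)
  have h1 := pv_divloop_eq tmp p (p.toNat + 1) 1 none le_rfl (by push_cast; omega)
  rw [pv_foldl_flatMap] at h1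
  have hpred : (PySem.List.pyRange 1 (pvS p + 1) 1).filter (fun e => decide (p % e = 0)) =
      (PySem.List.pyRange 1 (pvS p + 1) 1).filter (fun e => decide (e ∣ p)) := by
    apply List.filter_congr
    intro e _
    exact decide_eq_decide.mpr ⟨Int.dvd_of_emod_eq_zero, Int.emod_eq_zero_of_dvd⟩
  rw [hpred, pv_qstep_filter] at h1
  rw [h1, pv_ostep_finish]
  apply pvMF_perm
  have hperm := pv_divisors_perm p hp
  have htrunc : (PySem.List.pyRange 1 (n + 1) 1).filter (fun i => decide (i ∣ p)) =
      (PySem.List.pyRange 1 (p + 1) 1).filter (fun i => decide (i ∣ p)) := by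
    rw [PySem.List.pyRange_one_append 1 (p + 1) (n + 1) (by omega) (by omega), List.filter_append]
    have hnil : (PySem.List.pyRange (p + 1) (n + 1) 1).filter (fun i => decide (i ∣ p)) = [] := by
      apply List.filter_eq_nil_iff.mpr
      intro e he hdvd
      obtain ⟨he1, _⟩ := PySem.List.mem_pyRange_one.mp he
      have := Int.le_of_dvd (by omega) (of_decide_eq_true hdvd)
      omega
    rw [hnil, List.append_nil]
  have := ((hperm.filter (fun q => decide (0 ≤ pvG tmp q))).map (pvG tmp))
  unfold pvQ
  rw [← List.filter_filter, htrunc]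
  exact this

-- ===== whole-phase equality =====

lemma pv_phase_eq (tmp : Array Int) (n : Int) (A : List Int)
    (h : (0 ≤ n ∧ n ≤ (A.length : Int)) ∨ (∀ q : Int, pvG tmp q < 0)) :
    (PySem.List.pyRange 1 (n + 1) 1).foldl (pvOuterStep tmp n) A =
      (PySem.List.enumerate A 1).foldl (fun out pa =>
        out ++ [if pa.1 ≤ n then
            match pvDivLoop tmp pa.1 (pa.1.toNat + 1) 1 none with
            | none => pa.2
            | some q => pa.2 * q % pvMod
          else pa.2]) [] := by
  rw [PySem.List.foldl_append_singleton_eq_map]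
  simp only [List.nil_append]
  rcases h with ⟨hn0, hnA⟩ | hneg
  · apply List.ext_getElem?
    intro k
    have hnt : ((n.toNat : Nat) : Int) = n := Int.toNat_of_nonneg hn0
    have hget := pv_outer_get tmp n hn0 n.toNat (by omega) A (by omega) k
    rw [hnt] at hget
    rw [hget, List.getElem?_map, PySem.List.getElem?_enumerate]
    cases hA : A[k]? with
    | none => rfl
    | some a =>
      simp only [Option.map_some]
      have hp1 : (1:Int) + (k:Int) = (k:Int) + 1 := by ring
      rw [hp1]
      by_cases hkn : (k:Int) + 1 ≤ n
      · rw [if_pos hkn, pv_elem_eq tmp n ((k:Int)+1) a (by omega) hkn]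
        have hfe : (PySem.List.pyRange 1 (n + 1) 1).filter
              (fun i => decide (0 ≤ pvG tmp i) && decide (i ∣ ((k : Int) + 1)) &&
                decide ((k : Int) + 1 ≤ n)) =
            (PySem.List.pyRange 1 (n + 1) 1).filter
              (fun i => decide (0 ≤ pvG tmp i) && decide (i ∣ ((k : Int) + 1))) :=
          List.filter_congr (fun x _ => by simp [hkn])
        unfold pvQ
        rw [hfe]
      · rw [if_neg hkn]
        have hfe : (PySem.List.pyRange 1 (n + 1) 1).filter
              (fun i => decide (0 ≤ pvG tmp i) && decide (i ∣ ((k : Int) + 1)) &&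
                decide ((k : Int) + 1 ≤ n)) = [] :=
          List.filter_eq_nil_iff.mpr (fun x _ => by simp [hkn])
        rw [hfe]
        rfl
  · have hfold : (PySem.List.pyRange 1 (n + 1) 1).foldl (pvOuterStep tmp n) A = A := by
      rw [PySem.List.foldl_congr_mem _ _ (fun acc _ => acc) _
        (fun acc x _ => by rw [pvOuterStep_char, if_neg (by have := hneg x; omega)])]
      exact PySem.List.foldl_ignore _ _
    rw [hfold]
    have hmap : (PySem.List.enumerate A 1).map (fun pa =>
        if pa.1 ≤ n then
          match pvDivLoop tmp pa.1 (pa.1.toNat + 1) 1 none with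
          | none => pa.2
          | some q => pa.2 * q % pvMod
        else pa.2) = (PySem.List.enumerate A 1).map (fun pa => pa.2) := by
      apply List.map_congr_left
      intro pa hpa
      obtain ⟨k, hk, rfl⟩ := (PySem.List.mem_enumerate_iff A 1 pa).mp hpa
      dsimp only
      by_cases hpn : (1:Int) + (k:Int) ≤ n
      · rw [if_pos hpn, pv_elem_eq tmp n (1 + (k:Int)) _ (by omega) hpn]
        have hq : pvQ tmp n (1 + (k:Int)) = [] := by
          unfold pvQ
          rw [List.filter_eq_nil_iff.mpr
            (fun x _ => by simp [show ¬ (0 ≤ pvG tmp x) by have := hneg x; omega])]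
          rfl
        rw [hq]
        rfl
      · rw [if_neg hpn]
    rw [hmap, PySem.List.map_snd_enumerate]

lemma pv_buildTmp_empty_neg (n m : Int) (B C : List Int) (hm : m ≤ 0) :
    ∀ q : Int, pvG (pvBuildTmp n m B C) q < 0 := by
  intro q
  unfold pvBuildTmp
  rw [PySem.List.pyRange_one_eq_nil hm, List.foldl_nil]
  unfold pvG pvAGet?
  cases hj : pvAIdx (Array.replicate (n + 1).toNat (-1 : Int)).size q with
  | none => simp
  | some j =>
    simp only [Option.map_some, Option.getD_some]
    unfold Array.getD
    split
    · simp [Array.getElem_replicate]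
    · norm_num

-- ===== VERDICT (by name: the statement is the Claim_ definition above) =====
theorem optimize_array_spec : Claim_equal_optimize_array := by
  intro n m A B C _hdom hpre
  unfold Spec_optimize_array optimize_array optimize_array_alt
  apply pv_phase_eq
  rcases lt_or_ge 0 m with hm | hm
  · exact Or.inl ⟨(hpre hm).2.2.1, (hpre hm).2.2.2.1⟩
  · exact Or.inr (pv_buildTmp_empty_neg n m B C hm)
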